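-- pv_equiv track=rewrite | github.com/George-Ober/TP-ITC | TP9/piles-files.py | extraire_positif2
-- ===== SOURCE A (Python) =====
-- def creer_pile_vide():
--     # Renvoie une pile vide
--     return []
--
-- def empiler(e, p):
--     p.append(e)
--
-- def depiler(p):
--     sommet = p.pop()
--     return sommet
--
-- def est_pile_vide(p):
--     return len(p) == 0
--
-- def deverser(p_1, p_2):
--     while not est_pile_vide(p_1):
--         empiler(depiler(p_1), p_2)
--
-- def extraire_positif2(p):
--     a = creer_pile_vide()
--     b = creer_pile_vide()
--     while not est_pile_vide(p):
--         k = depiler(p)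
--         empiler(k, a)
--         if k > 0:
--             empiler(k, b)
--
--     deverser(a, p)
--     deverser(b, a)
--     return a
-- ===== SOURCE B (Python) =====
-- def extraire_positif2(p):
--     # One direct pass: collect positives in bottom-to-top order; p is not mutated.
--     return [x for x in p if x > 0]
-- ===== Notes on version B (the rewrite author's own statement) =====
-- stated objective: simpler
-- what changed: Replaces the pop-everything/two-auxiliary-stacks/restore-and-redump shuffle by a single non-mutating filter pass over the list (A temporarily mutates p but restores it; B never touches p).
import Mathlib
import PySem

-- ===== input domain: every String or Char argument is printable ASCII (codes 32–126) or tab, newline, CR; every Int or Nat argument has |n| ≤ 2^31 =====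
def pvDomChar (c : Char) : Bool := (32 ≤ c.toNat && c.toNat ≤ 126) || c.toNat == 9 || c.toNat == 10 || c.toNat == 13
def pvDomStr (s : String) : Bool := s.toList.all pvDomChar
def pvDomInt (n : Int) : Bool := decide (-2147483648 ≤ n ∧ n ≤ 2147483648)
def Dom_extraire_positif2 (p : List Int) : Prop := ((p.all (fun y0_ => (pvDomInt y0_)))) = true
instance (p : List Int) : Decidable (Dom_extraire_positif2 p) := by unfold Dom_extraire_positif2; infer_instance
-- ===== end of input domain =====

-- ===== PORT A =====
-- B changes: one non-mutating filter pass instead of A's pop/two-aux-stack/restore shuffle (simpler); equivalence is about the return value — A mutates p but restores it (net no-op).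
-- popping p from its top repeatedly = iterating over p.reverse
def pvLoopA : List Int → List Int → List Int → List Int × List Int
  | [], a, b => (a, b)
  | k :: rest, a, b => pvLoopA rest (a ++ [k]) (if k > 0 then b ++ [k] else b)

-- deverser(p_1, p_2): pop p_1 from its top, pushing each element onto p_2
def pvDeverser (p1 p2 : List Int) : List Int :=
  p1.reverse.foldl (fun d k => d ++ [k]) p2

def extraire_positif2 (p : List Int) : List Int :=
  let ab := pvLoopA p.reverse [] []
  let _pRestored := pvDeverser ab.1 []   -- p is restored (net no-op on p)
  pvDeverser ab.2 []

-- ===== PORT B =====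
def extraire_positif2_alt (p : List Int) : List Int :=
  p.filter (fun x => decide (x > 0))

-- ===== PRECONDITION & SPEC =====
def Spec_extraire_positif2 (p : List Int) (out : List Int) : Prop := out = extraire_positif2_alt p
instance (p : List Int) (out : List Int) : Decidable (Spec_extraire_positif2 p out) := by unfold Spec_extraire_positif2; infer_instance

-- ===== CLAIM (what is proved, stated in full; the proofs are below) =====
def Claim_equal_extraire_positif2 : Prop := ∀ (p : List Int), Dom_extraire_positif2 p → Spec_extraire_positif2 p (extraire_positif2 p)

-- ===== LEMMAS AND PROOFS =====

-- ===== VERDICT (by name: the statement is the Claim_ definition above) =====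
theorem pvDeverser_eq (p1 p2 : List Int) : pvDeverser p1 p2 = p2 ++ p1.reverse := by
  unfold pvDeverser
  induction p1.reverse generalizing p2 with
  | nil => simp
  | cons k t ih => simp [List.foldl, ih]

theorem pvLoopA_eq (l a b : List Int) :
    pvLoopA l a b = (a ++ l, b ++ l.filter (fun x => decide (x > 0))) := by
  induction l generalizing a b with
  | nil => simp [pvLoopA]
  | cons k t ih =>
    simp only [pvLoopA, ih, List.filter_cons]
    split <;> simp_all

theorem extraire_positif2_spec : Claim_equal_extraire_positif2 := by
  intro p _
  unfold Spec_extraire_positif2 extraire_positif2 extraire_positif2_alt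
  simp [pvLoopA_eq, pvDeverser_eq, List.filter_reverse]
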